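-- pv_equiv track=rewrite | github.com/shages/aoc | 2018/python/06/p1.py | min_manhattan
-- ===== SOURCE A (Python) =====
-- def manhattan(x1, y1, x2, y2):
--     return abs(x2-x1) + abs(y2-y1)
--
-- def min_manhattan(x, y, pairs):
--     distances = []
--     for i, (ax, ay) in enumerate(pairs):
--         distances.append((manhattan(x, y, ax, ay), i))
--     s = sorted(distances, key=lambda x: x[0])
--     if s[0][0] == s[1][0]:
--         return -1
--     return s[0][1]
-- ===== SOURCE B (Python) =====
-- def min_manhattan(x, y, pairs):
--     # single pass: track min distance, index of its first occurrence, and how often it occurs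
--     best = None
--     idx = -1
--     cnt = 0
--     for i, (ax, ay) in enumerate(pairs):
--         d = abs(ax - x) + abs(ay - y)
--         if best is None or d < best:
--             best, idx, cnt = d, i, 1
--         elif d == best:
--             cnt += 1
--     return -1 if cnt > 1 else idx
-- ===== Notes on version B (the rewrite author's own statement) =====
-- stated objective: faster
-- what changed: Instead of building a distance list and sorting it to inspect the two smallest entries, B makes one pass keeping the minimum distance, the index of its first occurrence, and the count of minima, returning -1 when the minimum is not unique.
import Mathlib
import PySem

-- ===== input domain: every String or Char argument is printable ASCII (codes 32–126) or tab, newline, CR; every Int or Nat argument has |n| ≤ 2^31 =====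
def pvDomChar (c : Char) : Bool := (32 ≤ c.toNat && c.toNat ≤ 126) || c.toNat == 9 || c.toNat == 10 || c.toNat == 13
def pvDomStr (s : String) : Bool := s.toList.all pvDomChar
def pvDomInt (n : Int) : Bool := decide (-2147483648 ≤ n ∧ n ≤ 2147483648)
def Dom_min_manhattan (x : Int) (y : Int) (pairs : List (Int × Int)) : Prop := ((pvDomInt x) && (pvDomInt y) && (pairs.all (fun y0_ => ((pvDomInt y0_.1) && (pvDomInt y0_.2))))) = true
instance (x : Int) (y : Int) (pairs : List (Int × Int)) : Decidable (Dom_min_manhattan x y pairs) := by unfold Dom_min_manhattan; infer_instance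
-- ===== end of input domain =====

-- B replaces A's build-a-list-and-sort (O(n log n)) by a single pass tracking the minimum
-- distance, the index of its first occurrence and the count of minima (O(n)).

-- ===== PORT A =====
def manhattanP (x1 : Int) (y1 : Int) (x2 : Int) (y2 : Int) : Int := |x2 - x1| + |y2 - y1|

def min_manhattan (x : Int) (y : Int) (pairs : List (Int × Int)) : Int :=
  let distances := (PySem.List.enumerate pairs).foldl
    (fun acc ip => acc ++ [(manhattanP x y ip.2.1 ip.2.2, ip.1)]) []
  let s := PySem.List.sorted distances (fun t => t.1)
  match PySem.List.pyGet? s 0, PySem.List.pyGet? s 1 with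
  | some t0, some t1 => if t0.1 = t1.1 then -1 else t0.2
  | _, _ => 0   -- s[0]/s[1] raises IndexError (fewer than two points); excluded by Pre_

-- ===== PORT B =====
def bStep (x : Int) (y : Int) (st : Option Int × Int × Int) (ip : Int × (Int × Int)) :
    Option Int × Int × Int :=
  let d := |ip.2.1 - x| + |ip.2.2 - y|
  match st with
  | (none, _, _) => (some d, ip.1, 1)
  | (some b, i, c) =>
      if d < b then (some d, ip.1, 1)
      else if d = b then (some b, i, c + 1)
      else (some b, i, c)

def min_manhattan_alt (x : Int) (y : Int) (pairs : List (Int × Int)) : Int :=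
  let st := (PySem.List.enumerate pairs).foldl (bStep x y) (none, -1, 0)
  if st.2.2 > 1 then -1 else st.2.1

-- ===== PRECONDITION & SPEC =====
-- Pre_ excludes only inputs with fewer than two points, where A raises IndexError at s[1].
def Pre_min_manhattan (x : Int) (y : Int) (pairs : List (Int × Int)) : Prop := 2 ≤ pairs.length
instance (x : Int) (y : Int) (pairs : List (Int × Int)) : Decidable (Pre_min_manhattan x y pairs) := by unfold Pre_min_manhattan; infer_instance
def pvWitness_min_manhattan : Int × Int × (List (Int × Int)) := (0, 0, [(1, 2), (3, 4)])

def Spec_min_manhattan (x : Int) (y : Int) (pairs : List (Int × Int)) (out : Int) : Prop := out = min_manhattan_alt x y pairs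
instance (x : Int) (y : Int) (pairs : List (Int × Int)) (out : Int) : Decidable (Spec_min_manhattan x y pairs out) := by unfold Spec_min_manhattan; infer_instance

-- ===== CLAIM (what is proved, stated in full; the proofs are below) =====
def Claim_equal_min_manhattan : Prop := ∀ (x : Int) (y : Int) (pairs : List (Int × Int)), Dom_min_manhattan x y pairs → Pre_min_manhattan x y pairs → Spec_min_manhattan x y pairs (min_manhattan x y pairs)

-- ===== LEMMAS AND PROOFS =====

-- the element inserted into A's sort for an enumerate entry
def fEnt (x : Int) (y : Int) (e : Int × (Int × Int)) : Int × Int :=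
  (|e.2.1 - x| + |e.2.2 - y|, e.1)

-- one insertion-sort step of A's fold
def insStep (x : Int) (y : Int) (acc : List (Int × Int)) (e : Int × (Int × Int)) : List (Int × Int) :=
  PySem.List.insertBy (fun a b => decide (a.1 < b.1)) (fEnt x y e) acc

lemma insertBy_cons_lt (v w : Int × Int) (l : List (Int × Int)) (h : v.1 < w.1) :
    PySem.List.insertBy (fun a b => decide (a.1 < b.1)) v (w :: l) = v :: w :: l := by
  simp [PySem.List.insertBy, h]

lemma insertBy_cons_ge (v w : Int × Int) (l : List (Int × Int)) (h : ¬ v.1 < w.1) :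
    PySem.List.insertBy (fun a b => decide (a.1 < b.1)) v (w :: l)
      = w :: PySem.List.insertBy (fun a b => decide (a.1 < b.1)) v l := by
  simp [PySem.List.insertBy, h]

-- stage-3 invariant: once two elements are processed, B's state (min, first index, count of minima)
-- and the head / second element of A's insertion-sorted accumulator stay in lockstep
lemma stage3 (x y : Int) : ∀ (l : List (Int × (Int × Int))) (b i c : Int) (t : Int × Int)
    (rest : List (Int × Int)), b ≤ t.1 → 1 ≤ c → (2 ≤ c ↔ t.1 = b) →
    ∃ b' i' c' t' rest',
      l.foldl (bStep x y) (some b, i, c) = (some b', i', c') ∧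
      l.foldl (insStep x y) ((b, i) :: t :: rest) = (b', i') :: t' :: rest' ∧
      b' ≤ t'.1 ∧ 1 ≤ c' ∧ (2 ≤ c' ↔ t'.1 = b') := by
  intro l
  induction l with
  | nil =>
      intro b i c t rest h1 h2 h3
      exact ⟨b, i, c, t, rest, rfl, rfl, h1, h2, h3⟩
  | cons e l ih =>
      intro b i c t rest h1 h2 h3
      set d : Int := |e.2.1 - x| + |e.2.2 - y| with hd
      rcases lt_trichotomy d b with hlt | heq | hgt
      · -- new strict minimum
        have hb : List.foldl (bStep x y) (some b, i, c) (e :: l)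
            = List.foldl (bStep x y) (some d, e.1, 1) l := by
          simp [bStep, ← hd, hlt]
        have ha : List.foldl (insStep x y) ((b, i) :: t :: rest) (e :: l)
            = List.foldl (insStep x y) ((d, e.1) :: (b, i) :: t :: rest) l := by
          simp only [List.foldl_cons]
          rw [show insStep x y ((b, i) :: t :: rest) e
                = (d, e.1) :: (b, i) :: t :: rest from
              by unfold insStep
                 rw [insertBy_cons_lt (fEnt x y e) (b, i) (t :: rest) (by simpa [fEnt, ← hd] using hlt)]
                 simp [fEnt, ← hd]]
        rw [hb, ha]
        exact ih d e.1 1 (b, i) (t :: rest) (le_of_lt hlt) le_rfl (by constructor <;> intro h <;> omega)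
      · -- ties the current minimum
        have hb : List.foldl (bStep x y) (some b, i, c) (e :: l)
            = List.foldl (bStep x y) (some b, i, c + 1) l := by
          simp [bStep, ← hd, heq]
        by_cases hlt2 : d < t.1
        · have ha : List.foldl (insStep x y) ((b, i) :: t :: rest) (e :: l)
              = List.foldl (insStep x y) ((b, i) :: (d, e.1) :: t :: rest) l := by
            simp only [List.foldl_cons]
            rw [show insStep x y ((b, i) :: t :: rest) e
                  = (b, i) :: (d, e.1) :: t :: rest by
                unfold insStep
                rw [insertBy_cons_ge _ _ _ (by simp [fEnt, ← hd]; omega),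
                    insertBy_cons_lt _ _ _ (by simpa [fEnt, ← hd] using hlt2)]
                simp [fEnt, ← hd]]
          rw [hb, ha]
          exact ih b i (c + 1) (d, e.1) (t :: rest) (by simpa using le_of_eq heq.symm) (by omega)
            (by constructor <;> intro h <;> omega)
        · have hteq : t.1 = b := le_antisymm (by omega) h1
          have ha : List.foldl (insStep x y) ((b, i) :: t :: rest) (e :: l)
              = List.foldl (insStep x y)
                  ((b, i) :: t :: PySem.List.insertBy (fun a b => decide (a.1 < b.1)) (fEnt x y e) rest) l := by
            simp only [List.foldl_cons]
            rw [show insStep x y ((b, i) :: t :: rest) e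
                  = (b, i) :: t :: PySem.List.insertBy (fun a b => decide (a.1 < b.1)) (fEnt x y e) rest by
                unfold insStep
                rw [insertBy_cons_ge _ _ _ (by simp [fEnt, ← hd]; omega),
                    insertBy_cons_ge _ _ _ (by simpa [fEnt, ← hd] using hlt2)]]
          rw [hb, ha]
          exact ih b i (c + 1) t _ h1 (by omega) (by constructor <;> intro h; exacts [hteq, by omega])
      · -- strictly larger than the minimum
        have hb : List.foldl (bStep x y) (some b, i, c) (e :: l)
            = List.foldl (bStep x y) (some b, i, c) l := by
          simp [bStep, ← hd, not_lt_of_gt hgt, ne_of_gt hgt]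
        by_cases hlt2 : d < t.1
        · have ha : List.foldl (insStep x y) ((b, i) :: t :: rest) (e :: l)
              = List.foldl (insStep x y) ((b, i) :: (d, e.1) :: t :: rest) l := by
            simp only [List.foldl_cons]
            rw [show insStep x y ((b, i) :: t :: rest) e
                  = (b, i) :: (d, e.1) :: t :: rest by
                unfold insStep
                rw [insertBy_cons_ge _ _ _ (by simp [fEnt, ← hd]; omega),
                    insertBy_cons_lt _ _ _ (by simpa [fEnt, ← hd] using hlt2)]
                simp [fEnt, ← hd]]
          rw [hb, ha]
          have hne : ¬ (2 ≤ c) := by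
            intro h
            have := h3.mp h
            omega
          exact ih b i c (d, e.1) (t :: rest) (le_of_lt hgt) h2
            (by constructor <;> intro h <;> [exact absurd h hne; omega])
        · have ha : List.foldl (insStep x y) ((b, i) :: t :: rest) (e :: l)
              = List.foldl (insStep x y)
                  ((b, i) :: t :: PySem.List.insertBy (fun a b => decide (a.1 < b.1)) (fEnt x y e) rest) l := by
            simp only [List.foldl_cons]
            rw [show insStep x y ((b, i) :: t :: rest) e
                  = (b, i) :: t :: PySem.List.insertBy (fun a b => decide (a.1 < b.1)) (fEnt x y e) rest by
                unfold insStep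
                rw [insertBy_cons_ge _ _ _ (by simp [fEnt, ← hd]; omega),
                    insertBy_cons_ge _ _ _ (by simpa [fEnt, ← hd] using hlt2)]]
          rw [hb, ha]
          exact ih b i c t _ h1 h2 h3

lemma enumerate_cons (p : Int × Int) (l : List (Int × Int)) (s : Int) :
    PySem.List.enumerate (p :: l) s = (s, p) :: PySem.List.enumerate l (s + 1) := by
  simp [PySem.List.enumerate]

-- A's result written as the insertion-sort fold it computes
lemma A_eq (x : Int) (y : Int) (pairs : List (Int × Int)) :
    min_manhattan x y pairs =
      (match PySem.List.pyGet? ((PySem.List.enumerate pairs).foldl (insStep x y) []) 0,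
             PySem.List.pyGet? ((PySem.List.enumerate pairs).foldl (insStep x y) []) 1 with
       | some t0, some t1 => if t0.1 = t1.1 then -1 else t0.2
       | _, _ => 0) := by
  unfold min_manhattan
  simp only [PySem.List.foldl_append_singleton_eq_map, List.nil_append,
    PySem.List.sorted_eq_foldl_insertBy, List.foldl_map]
  rfl

lemma pyGet2_0 (a b : Int × Int) (l : List (Int × Int)) :
    PySem.List.pyGet? (a :: b :: l) 0 = some a := by
  simp [PySem.List.pyGet?, PySem.List.pyIdx?,
    show (0 : Int) ≤ (l.length : Int) + 1 by positivity]

lemma pyGet2_1 (a b : Int × Int) (l : List (Int × Int)) :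
    PySem.List.pyGet? (a :: b :: l) 1 = some b := by
  simp [PySem.List.pyGet?, PySem.List.pyIdx?]

theorem min_manhattan_spec : Claim_equal_min_manhattan := by
  intro x y pairs _ hpre
  unfold Pre_min_manhattan at hpre
  unfold Spec_min_manhattan
  match pairs, hpre with
  | p0 :: p1 :: ps, _ =>
    rw [A_eq]
    unfold min_manhattan_alt
    rw [enumerate_cons, enumerate_cons]
    set l := PySem.List.enumerate ps (0 + 1 + 1) with hl
    set d0 : Int := |p0.1 - x| + |p0.2 - y| with hd0
    set d1 : Int := |p1.1 - x| + |p1.2 - y| with hd1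
    have hb0 : bStep x y (none, -1, 0) (0, p0) = (some d0, 0, 1) := by simp [bStep, ← hd0]
    have ha0 : insStep x y [] (0, p0) = [(d0, 0)] := by
      simp [insStep, PySem.List.insertBy, fEnt, ← hd0]
    have key : ∃ b' i' c' t' rest',
        List.foldl (bStep x y) (bStep x y (bStep x y (none, -1, 0) (0, p0)) (0 + 1, p1)) l
          = (some b', i', c') ∧
        List.foldl (insStep x y) (insStep x y (insStep x y [] (0, p0)) (0 + 1, p1)) l
          = (b', i') :: t' :: rest' ∧
        b' ≤ t'.1 ∧ 1 ≤ c' ∧ (2 ≤ c' ↔ t'.1 = b') := by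
      rw [hb0, ha0]
      rcases lt_trichotomy d1 d0 with hlt | heq | hgt
      · have hb1 : bStep x y (some d0, 0, 1) (0 + 1, p1) = (some d1, 0 + 1, 1) := by
          simp [bStep, ← hd1, hlt]
        have ha1 : insStep x y [(d0, 0)] (0 + 1, p1) = [(d1, 0 + 1), (d0, 0)] := by
          unfold insStep
          rw [insertBy_cons_lt _ _ _ (by simpa [fEnt, ← hd1] using hlt)]
          simp [fEnt, ← hd1]
        rw [hb1, ha1]
        exact stage3 x y l d1 (0 + 1) 1 (d0, 0) [] (le_of_lt hlt) le_rfl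
          (by constructor <;> intro h <;> omega)
      · have hb1 : bStep x y (some d0, 0, 1) (0 + 1, p1) = (some d0, 0, 2) := by
          simp [bStep, ← hd1, heq]
        have ha1 : insStep x y [(d0, 0)] (0 + 1, p1) = [(d0, 0), (d1, 0 + 1)] := by
          unfold insStep
          rw [insertBy_cons_ge _ _ _ (by simp [fEnt, ← hd1]; omega)]
          simp [PySem.List.insertBy, fEnt, ← hd1]
        rw [hb1, ha1]
        exact stage3 x y l d0 0 2 (d1, 0 + 1) [] (le_of_eq heq.symm) (by omega)
          (by constructor <;> intro h <;> omega)
      · have hb1 : bStep x y (some d0, 0, 1) (0 + 1, p1) = (some d0, 0, 1) := by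
          simp [bStep, ← hd1, not_lt_of_gt hgt, ne_of_gt hgt]
        have ha1 : insStep x y [(d0, 0)] (0 + 1, p1) = [(d0, 0), (d1, 0 + 1)] := by
          unfold insStep
          rw [insertBy_cons_ge _ _ _ (by simp [fEnt, ← hd1]; omega)]
          simp [PySem.List.insertBy, fEnt, ← hd1]
        rw [hb1, ha1]
        exact stage3 x y l d0 0 1 (d1, 0 + 1) [] (le_of_lt hgt) le_rfl
          (by constructor <;> intro h <;> omega)
    obtain ⟨b', i', c', t', rest', hB, hAcc, hle, hc1, hiff⟩ := key
    simp only [List.foldl_cons] at hB hAcc ⊢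
    rw [hB, hAcc, pyGet2_0, pyGet2_1]
    simp only []
    split_ifs <;> omega
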